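-- pv_equiv track=rewrite | github.com/AliKhanat88/codeforces | new_2024/div3 995/e.py | brute
-- ===== SOURCE A (Python) =====
-- def brute(n, k, a, b):
--     maxi = -1
--     for i in range(min(a), max(b) + 1):
--         count = 0
--         ans = 0
--         for j in range(n):
--             if i <= a[j]:
--                 ans += i
--             elif i > a[j] and i <= b[j]:
--                 ans += i
--                 count += 1
--         if count <= k:
--             maxi = max(maxi, ans)
--     return maxi
-- ===== SOURCE B (Python) =====
-- def bisect_left(xs, v):
--     lo = 0
--     hi = len(xs)
--     while lo < hi:
--         mid = (lo + hi) // 2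
--         if xs[mid] < v:
--             lo = mid + 1
--         else:
--             hi = mid
--     return lo
--
-- def brute(n, k, a, b):
--     lo = min(a)
--     hi = max(b)
--     if hi < lo:
--         return -1
--     avals = []
--     bvals = []
--     for j in range(n):
--         avals.append(a[j])
--         bvals.append(b[j])
--     mx = sorted(max(x, y) for x, y in zip(avals, bvals))
--     mn = sorted(min(x, y) for x, y in zip(avals, bvals))
--     bs = sorted(bvals)
--     cands = sorted(set([v for v in avals + bvals if lo <= v <= hi] + [hi]))
--     best = -1
--     for i in cands:
--         c = len(mx) - bisect_left(mx, i)
--         cnt = (len(bs) - bisect_left(bs, i)) - (len(mn) - bisect_left(mn, i))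
--         if cnt <= k:
--             best = max(best, i * c)
--     return best
-- ===== Notes on version B (the rewrite author's own statement) =====
-- stated objective: faster
-- what changed: Instead of scanning every integer i in [min(a), max(b)], B evaluates only the O(n) candidate values (a/b elements inside the range, plus max(b)) - the objective i*count is piecewise linear with nonnegative slope between those breakpoints - and computes each candidate's counts by hand-written binary search on three sorted arrays, using 'i<=a[j] or a[j]<i<=b[j] iff i<=max(a[j],b[j])' and '#{a[j]<i<=b[j]} = #{b[j]>=i} - #{min(a[j],b[j])>=i}'.
-- outside the precondition, e.g. on brute(2, 0, [5, 9], [5]): A returns 10, B raises IndexError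
import Mathlib
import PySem

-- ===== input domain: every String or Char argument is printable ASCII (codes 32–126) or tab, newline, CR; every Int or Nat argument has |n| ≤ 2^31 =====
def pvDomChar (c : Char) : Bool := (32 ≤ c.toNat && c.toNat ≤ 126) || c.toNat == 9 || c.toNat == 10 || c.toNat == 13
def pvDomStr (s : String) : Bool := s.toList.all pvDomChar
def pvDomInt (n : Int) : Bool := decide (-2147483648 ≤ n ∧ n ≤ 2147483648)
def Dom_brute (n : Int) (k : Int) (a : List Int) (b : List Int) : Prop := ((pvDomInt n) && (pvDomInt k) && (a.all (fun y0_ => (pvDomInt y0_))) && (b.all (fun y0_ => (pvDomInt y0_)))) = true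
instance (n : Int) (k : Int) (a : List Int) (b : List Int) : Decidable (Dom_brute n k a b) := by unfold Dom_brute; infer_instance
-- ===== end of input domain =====

-- B replaces A's scan over every integer in [min(a), max(b)] by a scan over the O(n) breakpoint
-- candidates (values of a/b inside the range, plus max(b)); return values proved equal on Pre_.


-- ===== PORT A =====
-- literal port of A: for i in range(min(a), max(b)+1) with an inner loop over j in range(n)
-- accumulating (count, ans); a[j]/b[j] are pyGetD (indices in range under Pre_brute)
def brute (n : Int) (k : Int) (a : List Int) (b : List Int) : Int :=
  match PySem.List.min? a (fun x => x), PySem.List.max? b (fun x => x) with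
  | some lomin, some himax =>
    (PySem.List.pyRange lomin (himax + 1) 1).foldl (fun maxi i =>
      let cs := (PySem.List.pyRange 0 n 1).foldl (fun (p : Int × Int) j =>
        let aj := PySem.List.pyGetD a j 0
        if i ≤ aj then (p.1, p.2 + i)
        else if aj < i ∧ i ≤ PySem.List.pyGetD b j 0 then (p.1 + 1, p.2 + i)
        else p) (0, 0)
      if cs.1 ≤ k then max maxi cs.2 else maxi) (-1)
  | _, _ => -1  -- min([])/max([]) raise ValueError in Python; excluded by Pre_brute

-- ===== PORT B =====
-- B-side helper: Source B's hand-written bisect_left (while lo < hi: halve), ported as the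
-- obvious recursion on the shrinking interval
def pvBisectLoop (xs : List Int) (v : Int) (lo hi : Int) : Int :=
  if h : lo < hi then
    let mid := PySem.Int.floordiv (lo + hi) 2
    if PySem.List.pyGetD xs mid 0 < v then pvBisectLoop xs v (mid + 1) hi
    else pvBisectLoop xs v lo mid
  else lo
termination_by (hi - lo).toNat
decreasing_by
  all_goals
    have hb := PySem.Int.floordiv_two_mid_bounds (le_of_lt h)
    have hlt : PySem.Int.floordiv (lo + hi) 2 < hi := by
      rw [PySem.Int.floordiv_lt_iff_lt_mul (by omega)]; omega
    omega

def pvBisectLeft (xs : List Int) (v : Int) : Int := pvBisectLoop xs v 0 (xs.length : Int)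

-- literal port of Source B's brute: early -1 on an empty range, avals/bvals collected over
-- j in range(n), three sorted arrays, cands = sorted(set(filtered vals + [hi])), then one
-- O(log n) bisect-counting step per candidate
def brute_alt (n : Int) (k : Int) (a : List Int) (b : List Int) : Int :=
  match PySem.List.min? a (fun x => x) with
  | none => -1  -- min([]) raises in Python; excluded by Pre_brute
  | some lo =>
  match PySem.List.max? b (fun x => x) with
  | none => -1  -- max([]) raises in Python; excluded by Pre_brute
  | some hi =>
    if hi < lo then -1
    else
      let avals := (PySem.List.pyRange 0 n 1).foldl (fun (acc : List Int) j =>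
        acc ++ [PySem.List.pyGetD a j 0]) []
      let bvals := (PySem.List.pyRange 0 n 1).foldl (fun (acc : List Int) j =>
        acc ++ [PySem.List.pyGetD b j 0]) []
      let mx := PySem.List.sorted ((avals.zip bvals).map (fun p => max p.1 p.2)) (fun x => x) false
      let mn := PySem.List.sorted ((avals.zip bvals).map (fun p => min p.1 p.2)) (fun x => x) false
      let bs := PySem.List.sorted bvals (fun x => x) false
      let cands := PySem.List.sorted
        (PySem.Set.ofList (((avals ++ bvals).filter (fun v => decide (lo ≤ v ∧ v ≤ hi))) ++ [hi]))
        (fun x => x) false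
      cands.foldl (fun best i =>
        let c := (mx.length : Int) - pvBisectLeft mx i
        let cnt := ((bs.length : Int) - pvBisectLeft bs i) - ((mn.length : Int) - pvBisectLeft mn i)
        if cnt ≤ k then max best (i * c) else best) (-1)

-- ===== PRECONDITION & SPEC =====
-- Pre_ excludes: empty a or b (min/max raise ValueError), and 0 < n exceeding a length of a or b
-- while the i-range is nonempty (the third disjunct says max(b) < min(a), i.e. the range is
-- empty and no element is ever indexed), where A raises IndexError on a[j]/b[j] — except a rare
-- corner (n ≤ len(a), n > len(b), every a[j] ≥ max(b) for j < n) where A can still return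
-- because b[j] hides behind the short-circuit 'i > a[j]'; B reads b[j] up front (see the cite).
def Pre_brute (n : Int) (k : Int) (a : List Int) (b : List Int) : Prop :=
  a ≠ [] ∧ b ≠ [] ∧
    (n ≤ 0 ∨ (n ≤ (a.length : Int) ∧ n ≤ (b.length : Int)) ∨
      (∀ x ∈ b, ∀ y ∈ a, x < y))
instance (n : Int) (k : Int) (a : List Int) (b : List Int) : Decidable (Pre_brute n k a b) := by
  unfold Pre_brute; infer_instance
def pvWitness_brute : Int × Int × List Int × List Int := (3, 1, [2, 5, 3], [4, 6, 3])
def Spec_brute (n : Int) (k : Int) (a : List Int) (b : List Int) (out : Int) : Prop := out = brute_alt n k a b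
instance (n : Int) (k : Int) (a : List Int) (b : List Int) (out : Int) : Decidable (Spec_brute n k a b out) := by unfold Spec_brute; infer_instance

-- ===== CLAIM (what is proved, stated in full; the proofs are below) =====
def Claim_equal_brute : Prop := ∀ (n : Int) (k : Int) (a : List Int) (b : List Int), Dom_brute n k a b → Pre_brute n k a b → Spec_brute n k a b (brute n k a b)

-- ===== LEMMAS AND PROOFS =====

-- the two counting functions both inner loops compute: cnt = #{j<n : a[j] < i ≤ b[j]},
-- c = #{j<n : i ≤ max(a[j], b[j])}
def pvCnt (n : Int) (a b : List Int) (i : Int) : Int :=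
  ((PySem.List.pyRange 0 n 1).countP
    (fun j => decide (PySem.List.pyGetD a j 0 < i ∧ i ≤ PySem.List.pyGetD b j 0)) : Int)
def pvC (n : Int) (a b : List Int) (i : Int) : Int :=
  ((PySem.List.pyRange 0 n 1).countP
    (fun j => decide (i ≤ max (PySem.List.pyGetD a j 0) (PySem.List.pyGetD b j 0))) : Int)

-- generic fold-max facts (the seed is a lower bound; every admitted element is a lower
-- bound; the result is the seed or an admitted element's value)
theorem pvFoldmax_ge_seed (P : Int → Prop) [DecidablePred P] (g : Int → Int)
    (l : List Int) (s : Int) :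
    s ≤ l.foldl (fun m i => if P i then max m (g i) else m) s := by
  induction l generalizing s with
  | nil => simp
  | cons x t ih =>
    simp only [List.foldl_cons]
    refine le_trans ?_ (ih (if P x then max s (g x) else s))
    split_ifs <;> simp

theorem pvFoldmax_mem (P : Int → Prop) [DecidablePred P] (g : Int → Int)
    (l : List Int) (s : Int) (i : Int) (hi : i ∈ l) (hP : P i) :
    g i ≤ l.foldl (fun m i => if P i then max m (g i) else m) s := by
  induction l generalizing s with
  | nil => simp at hi
  | cons x t ih =>
    simp only [List.foldl_cons]
    rcases List.mem_cons.1 hi with rfl | hmem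
    · refine le_trans ?_ (pvFoldmax_ge_seed P g t _)
      rw [if_pos hP]; exact le_max_right _ _
    · exact ih _ hmem

theorem pvFoldmax_cases (P : Int → Prop) [DecidablePred P] (g : Int → Int)
    (l : List Int) (s : Int) :
    l.foldl (fun m i => if P i then max m (g i) else m) s = s ∨
      ∃ i ∈ l, P i ∧ l.foldl (fun m i => if P i then max m (g i) else m) s = g i := by
  induction l generalizing s with
  | nil => exact Or.inl rfl
  | cons x t ih =>
    simp only [List.foldl_cons]
    rcases ih (if P x then max s (g x) else s) with h | ⟨i, hmem, hP, heq⟩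
    · rw [h]
      by_cases hPx : P x
      · rw [if_pos hPx]
        rcases max_choice s (g x) with h' | h'
        · exact Or.inl h'
        · exact Or.inr ⟨x, List.mem_cons_self, hPx, h'⟩
      · rw [if_neg hPx]; exact Or.inl rfl
    · exact Or.inr ⟨i, List.mem_cons_of_mem _ hmem, hP, heq⟩

-- A's inner loop computes (count, ans) = (pvCnt, i * pvC): the branch test
-- 'i ≤ a[j] or (a[j] < i ≤ b[j])' is 'i ≤ max(a[j], b[j])'
theorem pvInnerA (a b : List Int) (i : Int) (l : List Int) (c s : Int) :
    l.foldl (fun (p : Int × Int) j =>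
        let aj := PySem.List.pyGetD a j 0
        if i ≤ aj then (p.1, p.2 + i)
        else if aj < i ∧ i ≤ PySem.List.pyGetD b j 0 then (p.1 + 1, p.2 + i)
        else p) (c, s)
    = (c + (l.countP (fun j => decide (PySem.List.pyGetD a j 0 < i ∧ i ≤ PySem.List.pyGetD b j 0)) : Int),
       s + i * (l.countP (fun j => decide (i ≤ max (PySem.List.pyGetD a j 0) (PySem.List.pyGetD b j 0))) : Int)) := by
  induction l generalizing c s with
  | nil => simp
  | cons x t ih =>
    simp only [List.foldl_cons, List.countP_cons]
    by_cases h1 : i ≤ PySem.List.pyGetD a x 0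
    · have e1 : decide (PySem.List.pyGetD a x 0 < i ∧ i ≤ PySem.List.pyGetD b x 0) = false := by
        simp; omega
      have e2 : decide (i ≤ max (PySem.List.pyGetD a x 0) (PySem.List.pyGetD b x 0)) = true := by
        simp; omega
      rw [if_pos h1, ih, e1, e2]
      simp only [Prod.mk.injEq, reduceIte]
      constructor <;> push_cast <;> ring
    · rw [if_neg h1]
      by_cases h2 : PySem.List.pyGetD a x 0 < i ∧ i ≤ PySem.List.pyGetD b x 0
      · have e1 : decide (PySem.List.pyGetD a x 0 < i ∧ i ≤ PySem.List.pyGetD b x 0) = true := by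
          simp; omega
        have e2 : decide (i ≤ max (PySem.List.pyGetD a x 0) (PySem.List.pyGetD b x 0)) = true := by
          simp; omega
        rw [if_pos h2, ih, e1, e2]
        simp only [Prod.mk.injEq, reduceIte]
        constructor <;> push_cast <;> ring
      · have e1 : decide (PySem.List.pyGetD a x 0 < i ∧ i ≤ PySem.List.pyGetD b x 0) = false := by
          simp; omega
        have e2 : decide (i ≤ max (PySem.List.pyGetD a x 0) (PySem.List.pyGetD b x 0)) = false := by
          simp; omega
        rw [if_neg h2, ih, e1, e2]
        simp only [Prod.mk.injEq]
        constructor <;> push_cast <;> ring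

-- Source B's bisect loop: on a list nondecreasing by index, starting from an interval whose
-- outside is already classified, it returns the split point between values < v and values ≥ v
theorem pvBisectLoop_inv (xs : List Int) (v : Int)
    (hmono : ∀ p q : Nat, p ≤ q → q < xs.length → xs.getD p 0 ≤ xs.getD q 0) :
    ∀ (fuel : Nat) (lo hi : Int), (hi - lo).toNat ≤ fuel → 0 ≤ lo → lo ≤ hi → hi ≤ (xs.length : Int) →
    (∀ j : Nat, (j : Int) < lo → xs.getD j 0 < v) →
    (∀ j : Nat, hi ≤ (j : Int) → j < xs.length → v ≤ xs.getD j 0) →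
    0 ≤ pvBisectLoop xs v lo hi ∧ pvBisectLoop xs v lo hi ≤ (xs.length : Int) ∧
    (∀ j : Nat, (j : Int) < pvBisectLoop xs v lo hi → xs.getD j 0 < v) ∧
    (∀ j : Nat, pvBisectLoop xs v lo hi ≤ (j : Int) → j < xs.length → v ≤ xs.getD j 0) := by
  intro fuel
  induction fuel with
  | zero =>
    intro lo hi hf h0 hlh hhl hpre hsuf
    have hnot : ¬ lo < hi := by omega
    rw [pvBisectLoop, dif_neg hnot]
    exact ⟨h0, by omega, hpre, fun j h1 h2 => hsuf j (by omega) h2⟩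
  | succ f ih =>
    intro lo hi hf h0 hlh hhl hpre hsuf
    by_cases h : lo < hi
    · rw [pvBisectLoop, dif_pos h]
      have hb := PySem.Int.floordiv_two_mid_bounds (le_of_lt h)
      have hltm : PySem.Int.floordiv (lo + hi) 2 < hi := by
        rw [PySem.Int.floordiv_lt_iff_lt_mul (by omega)]; omega
      have hmg : PySem.List.pyGetD xs (PySem.Int.floordiv (lo + hi) 2) 0
          = xs.getD (PySem.Int.floordiv (lo + hi) 2).toNat 0 := by
        rw [PySem.List.pyGetD_eq_getElem xs 0 (by omega) (by omega),
          List.getD_eq_getElem xs 0 (by omega)]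
      by_cases hv : PySem.List.pyGetD xs (PySem.Int.floordiv (lo + hi) 2) 0 < v
      · rw [if_pos hv]
        refine ih (PySem.Int.floordiv (lo + hi) 2 + 1) hi (by omega) (by omega) (by omega) hhl ?_ hsuf
        intro j hj
        refine lt_of_le_of_lt ?_ (hmg ▸ hv)
        exact hmono j (PySem.Int.floordiv (lo + hi) 2).toNat (by omega) (by omega)
      · rw [if_neg hv]
        refine ih lo (PySem.Int.floordiv (lo + hi) 2) (by omega) h0 (by omega) (by omega) hpre ?_
        intro j h1 h2
        rw [hmg] at hv
        exact le_trans (not_lt.1 hv) (hmono (PySem.Int.floordiv (lo + hi) 2).toNat j (by omega) h2)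
    · rw [pvBisectLoop, dif_neg h]
      exact ⟨h0, by omega, hpre, fun j h1 h2 => hsuf j (by omega) h2⟩

-- a list whose first r positions satisfy p and whose later positions do not has countP = r
theorem pvCountP_split (p : Int → Bool) : ∀ (xs : List Int) (r : Nat), r ≤ xs.length →
    (∀ j : Nat, j < r → p (xs.getD j 0) = true) →
    (∀ j : Nat, r ≤ j → j < xs.length → p (xs.getD j 0) = false) →
    xs.countP p = r := by
  intro xs
  induction xs with
  | nil =>
    intro r hr _ _
    simp only [List.length_nil, Nat.le_zero] at hr
    simp [hr]
  | cons x t ih =>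
    intro r hr hpre hsuf
    cases r with
    | zero =>
      refine List.countP_eq_zero.2 ?_
      intro y hy
      obtain ⟨j, hj, rfl⟩ := List.mem_iff_getElem.1 hy
      have := hsuf j (Nat.zero_le _) hj
      rw [List.getD_eq_getElem _ _ hj] at this
      simp [this]
    | succ r' =>
      have hx : p x = true := by simpa using hpre 0 (Nat.succ_pos _)
      have ht : t.countP p = r' := ih r' (by simpa using hr)
        (fun j hj => by simpa using hpre (j + 1) (by omega))
        (fun j h1 h2 => by simpa using hsuf (j + 1) (by omega) (by simpa using h2))
      rw [List.countP_cons, hx, ht]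
      simp

-- len(sorted(ys)) - bisect_left(sorted(ys), i) counts the elements of ys that are ≥ i
theorem pvLenSubBisect (ys : List Int) (i : Int) :
    ((PySem.List.sorted ys (fun x => x) false).length : Int)
      - pvBisectLeft (PySem.List.sorted ys (fun x => x) false) i
    = (ys.countP (fun y => decide (i ≤ y)) : Int) := by
  set s := PySem.List.sorted ys (fun x => x) false with hs
  have hmono : ∀ p q : Nat, p ≤ q → q < s.length → s.getD p 0 ≤ s.getD q 0 := by
    intro p q hpq hq
    rw [List.getD_eq_getElem s 0 (lt_of_le_of_lt hpq hq), List.getD_eq_getElem s 0 hq]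
    exact PySem.List.sorted_id_getElem_mono ys hpq (hs ▸ hq)
  obtain ⟨h0, hle, hpre, hsuf⟩ := pvBisectLoop_inv s i hmono (s.length : Int).toNat
    0 (s.length : Int) (by omega) (by omega) (by omega) (by omega)
    (by intro j hj; exact absurd hj (by omega))
    (by intro j h1 h2; exact absurd h1 (by omega))
  have hcount : s.countP (fun y => decide (y < i)) = (pvBisectLoop s i 0 (s.length : Int)).toNat := by
    refine pvCountP_split _ s _ (by omega) ?_ ?_
    · intro j hj
      simpa using hpre j (by omega)
    · intro j h1 h2
      have := hsuf j (by omega) h2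
      simp only [decide_eq_false_iff_not]
      omega
  have hlen := List.length_eq_countP_add_countP (fun y => decide (y < i)) (l := s)
  have hneg : s.countP (fun a => decide ¬(decide (a < i) = true)) = s.countP (fun y => decide (i ≤ y)) :=
    List.countP_congr (fun y _ => by simp)
  have hperm : s.countP (fun y => decide (i ≤ y)) = ys.countP (fun y => decide (i ≤ y)) :=
    (PySem.List.sorted_perm ys (fun x => x) false).countP_eq _
  unfold pvBisectLeft
  omega

-- splitting the count of {j : i ≤ b[j]} by whether a[j] < i or i ≤ a[j] (i.e. i ≤ min)
theorem pvCntSplitJ (a b : List Int) (i : Int) (l : List Int) :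
    l.countP (fun j => decide (i ≤ PySem.List.pyGetD b j 0))
    = l.countP (fun j => decide (PySem.List.pyGetD a j 0 < i ∧ i ≤ PySem.List.pyGetD b j 0))
      + l.countP (fun j => decide (i ≤ min (PySem.List.pyGetD a j 0) (PySem.List.pyGetD b j 0))) := by
  induction l with
  | nil => simp
  | cons x t ih =>
    simp only [List.countP_cons, ih]
    have hstep : (if decide (i ≤ PySem.List.pyGetD b x 0) = true then 1 else 0)
        = (if decide (PySem.List.pyGetD a x 0 < i ∧ i ≤ PySem.List.pyGetD b x 0) = true then 1 else 0)
          + (if decide (i ≤ min (PySem.List.pyGetD a x 0) (PySem.List.pyGetD b x 0)) = true then 1 else 0) := by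
      simp only [decide_eq_true_eq, le_min_iff]
      split_ifs <;> omega
    omega

-- the heart of the matter-- the heart of the matter: over any list of candidates that (a) all lie in [lo, hi],
-- (b) contain hi, and (c) contain every a/b value (of index < n) lying in [lo, hi],
-- the fold-max equals the fold-max over the full integer range [lo, hi]
theorem pvRangeEqCands (n k : Int) (a b : List Int) (lo hi : Int)
    (cands : List Int)
    (hbounds : ∀ v ∈ cands, lo ≤ v ∧ v ≤ hi)
    (hhi : hi ∈ cands)
    (hclosed : ∀ j ∈ PySem.List.pyRange 0 n 1, ∀ w,
      (w = PySem.List.pyGetD a j 0 ∨ w = PySem.List.pyGetD b j 0) → lo ≤ w → w ≤ hi → w ∈ cands) :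
    (PySem.List.pyRange lo (hi + 1) 1).foldl
      (fun m i => if pvCnt n a b i ≤ k then max m (i * pvC n a b i) else m) (-1)
    = cands.foldl
      (fun m i => if pvCnt n a b i ≤ k then max m (i * pvC n a b i) else m) (-1) := by
  -- the candidate that dominates i: the least candidate ≥ i; counts are unchanged there
  have hkey : ∀ i, lo ≤ i → i ≤ hi →
      ∃ i' ∈ cands, i ≤ i' ∧ pvCnt n a b i' = pvCnt n a b i ∧ pvC n a b i' = pvC n a b i := by
    intro i h1 h2
    have hficf : hi ∈ cands.filter (fun v => decide (i ≤ v)) :=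
      List.mem_filter.2 ⟨hhi, by simpa using h2⟩
    obtain ⟨i', hmin⟩ : ∃ i', PySem.List.min? (cands.filter (fun v => decide (i ≤ v))) (fun x => x) = some i' := by
      cases h : PySem.List.min? (cands.filter (fun v => decide (i ≤ v))) (fun x => x) with
      | none =>
        rw [PySem.List.min?_eq_none_iff] at h
        rw [h] at hficf; simp at hficf
      | some m => exact ⟨m, rfl⟩
    have hi'f := PySem.List.min?_mem hmin
    have hi'mem : i' ∈ cands := (List.mem_filter.1 hi'f).1
    have hii' : i ≤ i' := by simpa using (List.mem_filter.1 hi'f).2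
    have hi'hi : i' ≤ hi := (hbounds i' hi'mem).2
    have hminle : ∀ v ∈ cands, i ≤ v → i' ≤ v := fun v hv hiv =>
      PySem.List.min?_isMin hmin v (List.mem_filter.2 ⟨hv, by simpa using hiv⟩)
    -- every a/b value w with i ≤ w also has i' ≤ w
    have hw : ∀ j ∈ PySem.List.pyRange 0 n 1, ∀ w,
        (w = PySem.List.pyGetD a j 0 ∨ w = PySem.List.pyGetD b j 0) → i ≤ w → i' ≤ w := by
      intro j hj w hwv hiw
      by_cases hwhi : w ≤ hi
      · exact hminle w (hclosed j hj w hwv (le_trans h1 hiw) hwhi) hiw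
      · omega
    refine ⟨i', hi'mem, hii', ?_, ?_⟩
    · unfold pvCnt
      congr 1
      apply List.countP_congr
      intro j hj
      have ha := hw j hj (PySem.List.pyGetD a j 0) (Or.inl rfl)
      have hb := hw j hj (PySem.List.pyGetD b j 0) (Or.inr rfl)
      simp only [decide_eq_true_eq]
      constructor
      · rintro ⟨hlt, hle⟩
        refine ⟨?_, le_trans hii' hle⟩
        by_contra hcon
        have := ha (by omega)
        omega
      · rintro ⟨hlt, hle⟩
        exact ⟨by omega, hb hle⟩
    · unfold pvC
      congr 1
      apply List.countP_congr
      intro j hj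
      have hm : i ≤ max (PySem.List.pyGetD a j 0) (PySem.List.pyGetD b j 0) →
          i' ≤ max (PySem.List.pyGetD a j 0) (PySem.List.pyGetD b j 0) := by
        intro h
        rcases max_choice (PySem.List.pyGetD a j 0) (PySem.List.pyGetD b j 0) with hc | hc <;>
          rw [hc] at h ⊢
        · exact hw j hj _ (Or.inl rfl) h
        · exact hw j hj _ (Or.inr rfl) h
      simp only [decide_eq_true_eq]
      exact ⟨fun h => le_trans hii' h, hm⟩
  apply le_antisymm
  · rcases pvFoldmax_cases (fun i => pvCnt n a b i ≤ k) (fun i => i * pvC n a b i)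
      (PySem.List.pyRange lo (hi + 1) 1) (-1) with h | ⟨i, hmem, hP, heq⟩
    · rw [h]; exact pvFoldmax_ge_seed _ _ _ _
    · rw [heq]
      obtain ⟨hlo_i, hi_hi⟩ := PySem.List.mem_pyRange_one.1 hmem
      obtain ⟨i', hc, hle, hcnt, hcv⟩ := hkey i hlo_i (by omega)
      calc i * pvC n a b i ≤ i' * pvC n a b i := by
            apply mul_le_mul_of_nonneg_right hle
            unfold pvC; positivity
        _ = i' * pvC n a b i' := by rw [hcv]
        _ ≤ _ := pvFoldmax_mem _ _ _ _ i' hc (by rw [hcnt]; exact hP)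
  · rcases pvFoldmax_cases (fun i => pvCnt n a b i ≤ k) (fun i => i * pvC n a b i)
      cands (-1) with h | ⟨i, hmem, hP, heq⟩
    · rw [h]; exact pvFoldmax_ge_seed _ _ _ _
    · rw [heq]
      obtain ⟨h1, h2⟩ := hbounds i hmem
      exact pvFoldmax_mem _ _ _ _ i (PySem.List.mem_pyRange_one.2 ⟨h1, by omega⟩) hP

-- ===== VERDICT (by name: the statement is the Claim_ definition above) =====
theorem brute_spec : Claim_equal_brute := by
  intro n k a b _ _
  unfold Spec_brute brute brute_alt
  cases hmin : PySem.List.min? a (fun x => x) with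
  | none => cases PySem.List.max? b (fun x => x) <;> rfl
  | some lo =>

  cases hmax : PySem.List.max? b (fun x => x) with
  | none => rfl
  | some hi =>
  simp only []
  by_cases hlt : hi < lo
  · rw [if_pos hlt, PySem.List.pyRange_one_eq_nil (show hi + 1 ≤ lo by omega)]
    rfl
  · rw [if_neg hlt]
    -- abbreviate Source B's intermediate lists
    set avals := (PySem.List.pyRange 0 n 1).foldl (fun (acc : List Int) j =>
      acc ++ [PySem.List.pyGetD a j 0]) [] with havals
    set bvals := (PySem.List.pyRange 0 n 1).foldl (fun (acc : List Int) j =>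
      acc ++ [PySem.List.pyGetD b j 0]) [] with hbvals
    set mx := PySem.List.sorted ((avals.zip bvals).map (fun p => max p.1 p.2)) (fun x => x) false with hmx
    set mn := PySem.List.sorted ((avals.zip bvals).map (fun p => min p.1 p.2)) (fun x => x) false with hmn
    set bs := PySem.List.sorted bvals (fun x => x) false with hbs
    set cands := PySem.List.sorted
      (PySem.Set.ofList (((avals ++ bvals).filter (fun v => decide (lo ≤ v ∧ v ≤ hi))) ++ [hi]))
      (fun x => x) false with hcands
    have hav : avals = (PySem.List.pyRange 0 n 1).map (fun j => PySem.List.pyGetD a j 0) := by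
      rw [havals, PySem.List.foldl_append_singleton_eq_map]; simp
    have hbv : bvals = (PySem.List.pyRange 0 n 1).map (fun j => PySem.List.pyGetD b j 0) := by
      rw [hbvals, PySem.List.foldl_append_singleton_eq_map]; simp
    -- rewrite both outer folds to the canonical fold-max over pvCnt/pvC
    have eA : (fun (maxi i : Int) =>
        let cs := (PySem.List.pyRange 0 n 1).foldl (fun (p : Int × Int) j =>
          let aj := PySem.List.pyGetD a j 0
          if i ≤ aj then (p.1, p.2 + i)
          else if aj < i ∧ i ≤ PySem.List.pyGetD b j 0 then (p.1 + 1, p.2 + i)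
          else p) (0, 0)
        if cs.1 ≤ k then max maxi cs.2 else maxi)
        = (fun m i => if pvCnt n a b i ≤ k then max m (i * pvC n a b i) else m) := by
      funext maxi i
      rw [pvInnerA a b i (PySem.List.pyRange 0 n 1) 0 0]
      simp [pvCnt, pvC]
    have hc : ∀ i : Int, (mx.length : Int) - pvBisectLeft mx i = pvC n a b i := by
      intro i
      rw [hmx, pvLenSubBisect, hav, hbv, List.zip_map', List.map_map, List.countP_map]
      unfold pvC
      congr 1
    have hcnt : ∀ i : Int, ((bs.length : Int) - pvBisectLeft bs i)
        - ((mn.length : Int) - pvBisectLeft mn i) = pvCnt n a b i := by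
      intro i
      rw [hbs, hmn, pvLenSubBisect, pvLenSubBisect, hav, hbv, List.zip_map',
        List.map_map, List.countP_map, List.countP_map]
      have hsplit := pvCntSplitJ a b i (PySem.List.pyRange 0 n 1)
      unfold pvCnt
      simp only [Function.comp_def]
      omega
    have eB : (fun (best i : Int) =>
        let c := (mx.length : Int) - pvBisectLeft mx i
        let cnt := ((bs.length : Int) - pvBisectLeft bs i) - ((mn.length : Int) - pvBisectLeft mn i)
        if cnt ≤ k then max best (i * c) else best)
        = (fun m i => if pvCnt n a b i ≤ k then max m (i * pvC n a b i) else m) := by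
      funext best i
      rw [hc i, hcnt i]
    rw [eA, eB]
    -- characterise membership in cands
    have hmem_cands : ∀ v, v ∈ cands ↔ ((v ∈ avals ++ bvals ∧ lo ≤ v ∧ v ≤ hi) ∨ v = hi) := by
      intro v
      rw [hcands, PySem.List.mem_sorted, PySem.Set.mem_ofList, List.mem_append,
        List.mem_filter]
      simp
    apply pvRangeEqCands n k a b lo hi
    · intro v hv
      rcases (hmem_cands v).1 hv with ⟨_, h1, h2⟩ | rfl
      · exact ⟨h1, h2⟩
      · exact ⟨by omega, le_refl _⟩
    · exact (hmem_cands hi).2 (Or.inr rfl)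
    · intro j hj w hwv h1 h2
      refine (hmem_cands w).2 (Or.inl ⟨?_, h1, h2⟩)
      rw [List.mem_append, hav, hbv]
      rcases hwv with rfl | rfl
      · exact Or.inl (List.mem_map.2 ⟨j, hj, rfl⟩)
      · exact Or.inr (List.mem_map.2 ⟨j, hj, rfl⟩)
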